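-- pv_equiv track=rewrite | github.com/Runarok/GeeksForGeeks-solutions | Difficulty: Basic/Evaluate the x + a = b statement/evaluate-the-x-a-b-statement.py | Evaluate
-- ===== SOURCE A (Python) =====
-- def Evaluate(expression):
--     # List to store extracted numbers
--     numbers = []
--     current_number = ''
--
--     # Iterate through each character in the string
--     for char in expression:
--         if char.isdigit():
--             current_number += char  # Build the number as a string
--         elif current_number:
--             numbers.append(int(current_number))  # Convert and store the number
--             current_number = ''  # Reset for next number
--
--     # Append the last number if any
--     if current_number:
--         numbers.append(int(current_number))
--
--     # Return the difference between the second and first number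
--     return numbers[1] - numbers[0]
-- ===== SOURCE B (Python) =====
-- def Evaluate(expression):
--     # Group-scan: find maximal runs of equal digit-ness with an inner scan,
--     # convert the digit runs via slicing; no accumulator/flush state machine.
--     numbers = []
--     i, n = 0, len(expression)
--     while i < n:
--         k = expression[i].isdigit()
--         j = i + 1
--         while j < n and expression[j].isdigit() == k:
--             j += 1
--         if k:
--             numbers.append(int(expression[i:j]))
--         i = j
--     return numbers[1] - numbers[0]
-- ===== Notes on version B (the rewrite author's own statement) =====
-- stated objective: alternative
-- what changed: Replaced A's char-by-char accumulate-and-reset state machine (string accumulator, flush on non-digit, trailing flush) by a two-level group scan that finds each maximal run of equal digit-ness with an inner index scan and converts digit runs by slicing.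
import Mathlib
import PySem

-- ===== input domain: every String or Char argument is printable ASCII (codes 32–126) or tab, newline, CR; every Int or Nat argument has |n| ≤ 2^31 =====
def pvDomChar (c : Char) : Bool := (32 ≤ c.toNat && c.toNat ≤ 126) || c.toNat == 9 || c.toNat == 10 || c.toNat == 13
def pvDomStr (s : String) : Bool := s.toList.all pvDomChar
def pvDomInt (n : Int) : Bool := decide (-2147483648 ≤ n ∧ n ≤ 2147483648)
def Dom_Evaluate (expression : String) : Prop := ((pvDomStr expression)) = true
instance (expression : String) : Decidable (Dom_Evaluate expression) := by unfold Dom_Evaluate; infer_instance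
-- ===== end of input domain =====

-- B replaces A's accumulate-and-reset state machine by a maximal-run group scan; alternative decomposition, same O(n) cost.

-- ===== PORT A =====
-- A's loop over the characters with state (numbers, current_number);
-- int(current_number) is ported as PySem.Int.ofChars? (exact: only called on nonempty digit runs).
def pvLoopA : List Char → List Int → List Char → List Int
  | [], nums, cur =>
      if cur.isEmpty then nums else nums ++ [(PySem.Int.ofChars? cur).getD 0]
  | c :: rest, nums, cur =>
      if PySem.Chars.isdigit c then
        pvLoopA rest nums (cur ++ [c])
      else if !cur.isEmpty then
        pvLoopA rest (nums ++ [(PySem.Int.ofChars? cur).getD 0]) []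
      else
        pvLoopA rest nums cur

def Evaluate (expression : String) : Int :=
  let numbers := pvLoopA expression.toList [] []
  (PySem.List.pyGet? numbers 1).getD 0 - (PySem.List.pyGet? numbers 0).getD 0

-- ===== PORT B =====
-- inner while loop "scan j while same digit-ness" = takeWhile/dropWhile split
def pvRuns : List Char → List (Bool × List Char)
  | [] => []
  | c :: rest =>
      let k := PySem.Chars.isdigit c
      (k, c :: rest.takeWhile (fun x => PySem.Chars.isdigit x == k)) ::
        pvRuns (rest.dropWhile (fun x => PySem.Chars.isdigit x == k))
  termination_by l => l.length
  decreasing_by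
    simpa [Nat.lt_succ_iff] using List.length_dropWhile_le _ _

def pvNumbersOf (cs : List Char) : List Int :=
  (pvRuns cs).filterMap (fun g => if g.1 then some ((PySem.Int.ofChars? g.2).getD 0) else none)

def Evaluate_alt (expression : String) : Int :=
  let numbers := pvNumbersOf expression.toList
  (PySem.List.pyGet? numbers 1).getD 0 - (PySem.List.pyGet? numbers 0).getD 0

-- ===== PRECONDITION & SPEC =====
-- Pre_: the string contains at least two maximal digit runs (counted by their start
-- positions); otherwise Python A raises IndexError on numbers[1] - numbers[0].
def Pre_Evaluate (expression : String) : Prop :=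
  2 ≤ ((List.range expression.toList.length).filter (fun i =>
        PySem.Chars.isdigit (expression.toList.getD i ' ') &&
        (decide (i = 0) || !PySem.Chars.isdigit (expression.toList.getD (i - 1) ' ')))).length
instance (expression : String) : Decidable (Pre_Evaluate expression) := by
  unfold Pre_Evaluate; infer_instance

def pvWitness_Evaluate : String := "x + 3 = 7"

def Spec_Evaluate (expression : String) (out : Int) : Prop := out = Evaluate_alt expression
instance (expression : String) (out : Int) : Decidable (Spec_Evaluate expression out) := by unfold Spec_Evaluate; infer_instance

-- ===== CLAIM (what is proved, stated in full; the proofs are below) =====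
def Claim_equal_Evaluate : Prop := ∀ (expression : String), Dom_Evaluate expression → Pre_Evaluate expression → Spec_Evaluate expression (Evaluate expression)

-- ===== LEMMAS AND PROOFS =====

theorem pv_takeWhile_all_append {α : Type} (p : α → Bool) (xs ys : List α)
    (h : ∀ x ∈ xs, p x = true) (h2 : ys.takeWhile p = []) :
    (xs ++ ys).takeWhile p = xs := by
  induction xs with
  | nil => simpa using h2
  | cons a t ih =>
      simp only [List.cons_append, List.takeWhile_cons, h a (by simp)]
      simp [ih (fun x hx => h x (by simp [hx]))]

theorem pv_dropWhile_all_append {α : Type} (p : α → Bool) (xs ys : List α)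
    (h : ∀ x ∈ xs, p x = true) :
    (xs ++ ys).dropWhile p = ys.dropWhile p := by
  induction xs with
  | nil => simp
  | cons a t ih =>
      simp only [List.cons_append, List.dropWhile_cons, h a (by simp)]
      exact ih (fun x hx => h x (by simp [hx]))

-- heads that break a run: takeWhile stops immediately
theorem pv_takeWhile_nil_of_head {cs : List Char} {k : Bool}
    (h : cs = [] ∨ ∃ c t, cs = c :: t ∧ PySem.Chars.isdigit c = !k) :
    cs.takeWhile (fun x => PySem.Chars.isdigit x == k) = [] := by
  rcases h with h | ⟨c, t, rfl, hc⟩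
  · simp [h]
  · simp [hc]

theorem pv_dropWhile_self_of_head {cs : List Char} {k : Bool}
    (h : cs = [] ∨ ∃ c t, cs = c :: t ∧ PySem.Chars.isdigit c = !k) :
    cs.dropWhile (fun x => PySem.Chars.isdigit x == k) = cs := by
  rcases h with h | ⟨c, t, rfl, hc⟩
  · simp [h]
  · simp [hc]

-- the head of dropWhile (non-digit) is a digit (or the rest is empty)
theorem pv_head_dropWhile (rest : List Char) :
    rest.dropWhile (fun x => PySem.Chars.isdigit x == false) = [] ∨
    ∃ d t, rest.dropWhile (fun x => PySem.Chars.isdigit x == false) = d :: t ∧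
      PySem.Chars.isdigit d = true := by
  induction rest with
  | nil => exact Or.inl rfl
  | cons a t ih =>
      by_cases ha : PySem.Chars.isdigit a = true
      · exact Or.inr ⟨a, t, by simp [ha], ha⟩
      · have ha' : PySem.Chars.isdigit a = false := by simpa using ha
        simpa [List.dropWhile_cons, ha'] using ih

-- a nonempty all-digit run followed by a non-digit (or nothing) is one group
theorem pv_runs_digits_prepend (cur cs : List Char) (hne : cur ≠ [])
    (hd : ∀ a ∈ cur, PySem.Chars.isdigit a = true)
    (hcs : cs = [] ∨ ∃ c t, cs = c :: t ∧ PySem.Chars.isdigit c = false) :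
    pvRuns (cur ++ cs) = (true, cur) :: pvRuns cs := by
  obtain ⟨a, cur', rfl⟩ := List.exists_cons_of_ne_nil hne
  have ha : PySem.Chars.isdigit a = true := hd a (by simp)
  have hcs' : cs = [] ∨ ∃ c t, cs = c :: t ∧ PySem.Chars.isdigit c = !true := by
    simpa using hcs
  rw [List.cons_append, pvRuns, ha]
  rw [pv_takeWhile_all_append _ cur' cs
        (fun x hx => by simp [hd x (by simp [hx])])
        (pv_takeWhile_nil_of_head hcs'),
      pv_dropWhile_all_append _ cur' cs
        (fun x hx => by simp [hd x (by simp [hx])]),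
      pv_dropWhile_self_of_head hcs']

theorem pv_numbersOf_digits_prepend (cur cs : List Char) (hne : cur ≠ [])
    (hd : ∀ a ∈ cur, PySem.Chars.isdigit a = true)
    (hcs : cs = [] ∨ ∃ c t, cs = c :: t ∧ PySem.Chars.isdigit c = false) :
    pvNumbersOf (cur ++ cs) = (PySem.Int.ofChars? cur).getD 0 :: pvNumbersOf cs := by
  rw [pvNumbersOf, pv_runs_digits_prepend cur cs hne hd hcs]
  simp [pvNumbersOf]

-- all-non-digit prefixes contribute no numbers
theorem pv_numbersOf_nondigits_prepend (g : List Char) : ∀ (r : List Char),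
    (∀ x ∈ g, PySem.Chars.isdigit x = false) →
    (r = [] ∨ ∃ d t, r = d :: t ∧ PySem.Chars.isdigit d = true) →
    pvNumbersOf (g ++ r) = pvNumbersOf r := by
  induction g with
  | nil => intro r _ _; simp
  | cons a g' ih =>
      intro r hg hr
      have ha : PySem.Chars.isdigit a = false := hg a (by simp)
      have hg' : ∀ x ∈ g', PySem.Chars.isdigit x = false := fun x hx => hg x (by simp [hx])
      have hr' : r = [] ∨ ∃ d t, r = d :: t ∧ PySem.Chars.isdigit d = !false := by
        simpa using hr
      rw [pvNumbersOf, List.cons_append, pvRuns, ha]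
      rw [pv_takeWhile_all_append _ g' r (fun x hx => by simp [hg' x hx])
            (pv_takeWhile_nil_of_head hr'),
          pv_dropWhile_all_append _ g' r (fun x hx => by simp [hg' x hx]),
          pv_dropWhile_self_of_head hr']
      simp only [List.filterMap_cons, Bool.false_eq_true, if_false]
      rfl

-- leading non-digit characters do not change the extracted numbers
theorem pv_numbersOf_cons_nondigit (c : Char) (rest : List Char)
    (hc : PySem.Chars.isdigit c = false) :
    pvNumbersOf (c :: rest) = pvNumbersOf rest := by
  have hsplit := List.takeWhile_append_dropWhile
    (p := fun x => PySem.Chars.isdigit x == false) (l := rest)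
  have hgall : ∀ x ∈ rest.takeWhile (fun x => PySem.Chars.isdigit x == false),
      PySem.Chars.isdigit x = false := by
    intro x hx; simpa using List.mem_takeWhile_imp hx
  have hrhead := pv_head_dropWhile rest
  rw [pvNumbersOf, pvRuns, hc]
  simp only [List.filterMap_cons, Bool.false_eq_true, if_false]
  conv_rhs => rw [← hsplit]
  rw [pv_numbersOf_nondigits_prepend _ _ hgall hrhead]
  rfl

-- main invariant: A's loop produces exactly B's numbers list
theorem pv_loopA_eq (cs : List Char) : ∀ (nums : List Int) (cur : List Char),
    (∀ a ∈ cur, PySem.Chars.isdigit a = true) →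
    pvLoopA cs nums cur = nums ++ pvNumbersOf (cur ++ cs) := by
  induction cs with
  | nil =>
      intro nums cur hcur
      by_cases hc : cur = []
      · subst hc; simp [pvLoopA, pvNumbersOf, pvRuns]
      · rw [pvLoopA]
        have hne : cur.isEmpty = false := by simpa [List.isEmpty_iff] using hc
        rw [hne]
        simp only [Bool.false_eq_true, if_false]
        rw [pv_numbersOf_digits_prepend cur [] hc hcur (Or.inl rfl)]
        simp [pvNumbersOf, pvRuns]
  | cons c rest ih =>
      intro nums cur hcur
      rw [pvLoopA]
      by_cases hdig : PySem.Chars.isdigit c = true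
      · rw [hdig]
        simp only [if_true]
        rw [ih nums (cur ++ [c]) (by intro a ha; rcases List.mem_append.1 ha with h | h
                                     · exact hcur a h
                                     · simp at h; subst h; exact hdig)]
        simp
      · have hdig' : PySem.Chars.isdigit c = false := by simpa using hdig
        rw [hdig']
        simp only [Bool.false_eq_true, if_false]
        by_cases hc : cur = []
        · subst hc
          simp only [List.isEmpty_nil, Bool.not_true, Bool.false_eq_true, if_false]
          rw [ih nums [] (by simp)]
          simp [pv_numbersOf_cons_nondigit c rest hdig']
        · have hne : cur.isEmpty = false := by simpa [List.isEmpty_iff] using hc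
          rw [hne]
          simp only [Bool.not_false, if_true]
          rw [ih (nums ++ [(PySem.Int.ofChars? cur).getD 0]) [] (by simp)]
          rw [pv_numbersOf_digits_prepend cur (c :: rest) hc hcur
                (Or.inr ⟨c, rest, rfl, hdig'⟩),
              pv_numbersOf_cons_nondigit c rest hdig']
          simp

-- ===== VERDICT (by name: the statement is the Claim_ definition above) =====
theorem Evaluate_spec : Claim_equal_Evaluate := by
  intro expression _ _
  unfold Spec_Evaluate Evaluate Evaluate_alt
  rw [pv_loopA_eq expression.toList [] [] (by simp)]
  simp
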